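-- pv_equiv track=rewrite | github.com/open-mmlab/mmrazor | mmrazor/models/mutators/channel_mutator/slimmable_channel_mutator.py | _merge_channel_cfgs
-- ===== SOURCE A (Python) =====
-- from typing import Dict, List, Optional
--
-- def _merge_channel_cfgs(channel_cfgs: List[Dict]):
--     """Merge several channel configs.
--
--     Args:
--         channel_cfgs (List[Dict])
--     """
--     merged_channel_cfg = dict()
--     num_subnet = len(channel_cfgs)
--
--     for module_name in channel_cfgs[0].keys():
--         channels_per_layer = [
--             channel_cfgs[idx][module_name] for idx in range(num_subnet)
--         ]
--         merged_channels_per_layer = dict()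
--         for key in channels_per_layer[0].keys():
--             merged_channels = [
--                 channels_per_layer[idx][key] for idx in range(num_subnet)
--             ]
--             merged_channels_per_layer[key] = merged_channels
--         merged_channel_cfg[module_name] = merged_channels_per_layer
--
--     return merged_channel_cfg
-- ===== SOURCE B (Python) =====
-- def _merge_channel_cfgs(channel_cfgs):
--     """Merge several channel configs (accumulator version)."""
--     merged = {
--         module_name: {key: [value] for key, value in channels.items()}
--         for module_name, channels in channel_cfgs[0].items()
--     }
--     for cfg in channel_cfgs[1:]:
--         for module_name, channels in merged.items():
--             for key, lst in channels.items():
--                 lst.append(cfg[module_name][key])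
--     return merged
-- ===== Notes on version B (the rewrite author's own statement) =====
-- stated objective: alternative
-- what changed: B builds the merged dict once from subnet 0 and then makes one appending pass per remaining subnet, instead of A's per-key comprehensions that index back into all subnets for every module/key.
import Mathlib
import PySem

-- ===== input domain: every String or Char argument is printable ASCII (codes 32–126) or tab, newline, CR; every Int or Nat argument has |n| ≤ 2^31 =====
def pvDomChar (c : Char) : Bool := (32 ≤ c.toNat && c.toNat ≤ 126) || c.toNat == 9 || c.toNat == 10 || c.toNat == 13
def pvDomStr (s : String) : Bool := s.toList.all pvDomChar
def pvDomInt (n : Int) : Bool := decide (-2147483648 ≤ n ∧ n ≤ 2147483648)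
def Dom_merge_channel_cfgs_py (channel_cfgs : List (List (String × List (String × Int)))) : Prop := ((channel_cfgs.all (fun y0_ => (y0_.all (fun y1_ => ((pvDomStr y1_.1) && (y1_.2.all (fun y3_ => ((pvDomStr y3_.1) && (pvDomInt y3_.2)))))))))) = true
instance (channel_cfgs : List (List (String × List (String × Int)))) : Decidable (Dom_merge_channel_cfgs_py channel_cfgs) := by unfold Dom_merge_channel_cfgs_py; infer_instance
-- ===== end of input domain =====

-- B builds the merged dict once from subnet 0 and then makes one appending pass per remaining
-- subnet, instead of A's per-(module,key) comprehensions indexing back into every subnet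
-- (alternative decomposition, same cost); return-value equivalence only.

-- ===== PORT A =====
-- dict lookups use PySem.Dict.get? (first match); the .getD defaults are never reached under Pre_
-- (Python raises KeyError/IndexError exactly there).
def merge_channel_cfgs_py (channel_cfgs : List (List (String × List (String × Int)))) : List (String × List (String × List Int)) :=
  let num_subnet := channel_cfgs.length
  let first := PySem.List.pyGetD channel_cfgs 0 []
  (first.foldl (fun acc p =>
    let channels_per_layer : List (List (String × Int)) :=
      (List.range num_subnet).map (fun (idx : Nat) =>
        ((PySem.Dict.mk (PySem.List.pyGetD channel_cfgs (idx : Int) [])).get? p.1).getD [])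
    let d0 := PySem.List.pyGetD channels_per_layer 0 []
    let inner := d0.foldl (fun acc2 q =>
      let merged_channels :=
        (List.range num_subnet).map (fun (idx : Nat) =>
          ((PySem.Dict.mk (PySem.List.pyGetD channels_per_layer (idx : Int) [])).get? q.1).getD 0)
      acc2.insert q.1 merged_channels) (PySem.Dict.mk [])
    acc.insert p.1 inner.items) (PySem.Dict.mk [])).items

-- ===== PORT B =====
def merge_channel_cfgs_py_alt (channel_cfgs : List (List (String × List (String × Int)))) : List (String × List (String × List Int)) :=
  let first := PySem.List.pyGetD channel_cfgs 0 []
  let merged0 := first.map (fun p => (p.1, p.2.map (fun q => (q.1, [q.2]))))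
  (PySem.List.slice channel_cfgs (some 1) none).foldl (fun merged cfg =>
    merged.map (fun p => (p.1, p.2.map (fun q =>
      (q.1, q.2 ++ [((PySem.Dict.mk (((PySem.Dict.mk cfg).get? p.1).getD [])).get? q.1).getD 0]))))) merged0

-- ===== PRECONDITION & SPEC =====
-- Pre_ admits exactly the inputs on which the Python returns: a nonempty list of configs where every
-- module key of channel_cfgs[0] exists in every config and every inner key of channel_cfgs[0]'s dicts
-- exists in the corresponding inner dict (otherwise both programs raise IndexError/KeyError); the
-- Nodup conjuncts only say the association lists really denote Python dicts (unique keys).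
def pvOkCfg (first : List (String × List (String × Int))) (cfg : List (String × List (String × Int))) : Bool :=
  first.all (fun p =>
    match (PySem.Dict.mk cfg).get? p.1 with
    | none => false
    | some d => p.2.all (fun q => ((PySem.Dict.mk d).get? q.1).isSome))

def Pre_merge_channel_cfgs_py (channel_cfgs : List (List (String × List (String × Int)))) : Prop :=
  channel_cfgs ≠ [] ∧
  ((channel_cfgs.headD []).map Prod.fst).Nodup ∧
  (∀ p ∈ channel_cfgs.headD [], (p.2.map Prod.fst).Nodup) ∧
  (∀ cfg ∈ channel_cfgs, pvOkCfg (channel_cfgs.headD []) cfg = true)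
instance (channel_cfgs : List (List (String × List (String × Int)))) : Decidable (Pre_merge_channel_cfgs_py channel_cfgs) := by unfold Pre_merge_channel_cfgs_py; infer_instance

def pvWitness_merge_channel_cfgs_py : (List (List (String × List (String × Int)))) :=
  [[("conv1", [("out", 8), ("in", 3)]), ("conv2", [("out", 16)])],
   [("conv1", [("out", 4), ("in", 3)]), ("conv2", [("out", 8)])]]

def Spec_merge_channel_cfgs_py (channel_cfgs : List (List (String × List (String × Int)))) (out : List (String × List (String × List Int))) : Prop := out = merge_channel_cfgs_py_alt channel_cfgs
instance (channel_cfgs : List (List (String × List (String × Int)))) (out : List (String × List (String × List Int))) : Decidable (Spec_merge_channel_cfgs_py channel_cfgs out) := by unfold Spec_merge_channel_cfgs_py; infer_instance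

-- ===== CLAIM (what is proved, stated in full; the proofs are below) =====
def Claim_equal_merge_channel_cfgs_py : Prop := ∀ (channel_cfgs : List (List (String × List (String × Int)))), Dom_merge_channel_cfgs_py channel_cfgs → Pre_merge_channel_cfgs_py channel_cfgs → Spec_merge_channel_cfgs_py channel_cfgs (merge_channel_cfgs_py channel_cfgs)

-- ===== LEMMAS AND PROOFS =====

-- the value channel_cfgs[idx][module][key] (defaults never reached under Pre_)

def pvVal (cfg : List (String × List (String × Int))) (m k : String) : Int :=
  ((PySem.Dict.mk (((PySem.Dict.mk cfg).get? m).getD [])).get? k).getD 0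

theorem pv_map_range_getD {α β : Type} (xs : List α) (d : α) (f : α → β) :
    (List.range xs.length).map (fun (idx : Nat) => f (PySem.List.pyGetD xs (idx : Int) d)) = xs.map f := by
  apply List.ext_getElem
  · simp
  · intro i h1 h2
    have hx : i < xs.length := by simpa using h2
    rw [List.getElem_map, List.getElem_map, List.getElem_range,
        PySem.List.pyGetD_natCast, List.getD_eq_getElem?_getD, List.getElem?_eq_getElem hx]
    rfl

theorem pv_map_range_getD_map {α β γ : Type} (xs : List α) (g : α → β) (d : β) (f : β → γ) :
    (List.range xs.length).map (fun (idx : Nat) => f (PySem.List.pyGetD (xs.map g) (idx : Int) d)) = xs.map (fun x => f (g x)) := by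
  apply List.ext_getElem
  · simp
  · intro i h1 h2
    have hx : i < xs.length := by simpa using h2
    have hx' : i < (xs.map g).length := by simpa using hx
    rw [List.getElem_map, List.getElem_map, List.getElem_range,
        PySem.List.pyGetD_natCast, List.getD_eq_getElem?_getD, List.getElem?_eq_getElem hx']
    simp

theorem pv_A_nf (c0 : List (String × List (String × Int))) (rest : List (List (String × List (String × Int))))
    (h1 : (c0.map Prod.fst).Nodup) (h2 : ∀ p ∈ c0, (p.2.map Prod.fst).Nodup) :
    merge_channel_cfgs_py (c0 :: rest) =
      c0.map (fun p => (p.1, p.2.map (fun q => (q.1, (c0 :: rest).map (fun cfg => pvVal cfg p.1 q.1))))) := by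
  unfold merge_channel_cfgs_py
  simp only [PySem.List.pyGetD_zero_cons]
  rw [PySem.List.foldl_congr_mem' c0 _
      (fun acc p => acc.insert p.1 (p.2.map (fun q => (q.1, (c0 :: rest).map (fun cfg => pvVal cfg p.1 q.1)))))
      (PySem.Dict.mk []) ?hcong]
  · rw [PySem.Dict.items_foldl_insert_fresh c0 Prod.fst
        (fun p => p.2.map (fun q => (q.1, (c0 :: rest).map (fun cfg => pvVal cfg p.1 q.1))))
        (PySem.Dict.mk []) (by intro a _; simp) h1]
    simp
  case hcong =>
    intro p hp acc
    have hmem : (p.1, p.2) ∈ (PySem.Dict.mk c0).items := by simpa [PySem.Dict.items] using hp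
    have hget : (PySem.Dict.mk c0).get? p.1 = some p.2 :=
      PySem.Dict.get?_of_mem_items _ hmem (by simpa using h1)
    simp only [pv_map_range_getD (c0 :: rest) [] (fun cfg => ((PySem.Dict.mk cfg).get? p.1).getD [])]
    have hd0 : PySem.List.pyGetD ((c0 :: rest).map (fun cfg => ((PySem.Dict.mk cfg).get? p.1).getD [])) 0 [] = p.2 := by
      simp [PySem.List.pyGetD_zero_cons, hget]
    rw [hd0]
    rw [PySem.List.foldl_congr_mem' p.2 _
        (fun acc2 q => acc2.insert q.1 ((c0 :: rest).map (fun cfg => pvVal cfg p.1 q.1)))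
        (PySem.Dict.mk []) ?hcong2]
    case hcong2 =>
      intro q hq acc2
      congr 1
      rw [pv_map_range_getD_map (c0 :: rest) (fun cfg => ((PySem.Dict.mk cfg).get? p.1).getD []) []
          (fun dl => ((PySem.Dict.mk dl).get? q.1).getD 0)]
      rfl
    congr 1
    rw [PySem.Dict.items_foldl_insert_fresh p.2 Prod.fst
        (fun q => (c0 :: rest).map (fun cfg => pvVal cfg p.1 q.1))
        (PySem.Dict.mk []) (by intro a _; simp) (h2 p hp)]
    simp

theorem pv_B_fold (cfgsR : List (List (String × List (String × Int)))) (ms : List (String × List (String × List Int))) :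
    cfgsR.foldl (fun merged cfg =>
      merged.map (fun p => (p.1, p.2.map (fun q =>
        (q.1, q.2 ++ [((PySem.Dict.mk (((PySem.Dict.mk cfg).get? p.1).getD [])).get? q.1).getD 0]))))) ms
    = ms.map (fun p => (p.1, p.2.map (fun q => (q.1, q.2 ++ cfgsR.map (fun cfg => pvVal cfg p.1 q.1))))) := by
  induction cfgsR generalizing ms with
  | nil => simp
  | cons c cs ih =>
    rw [List.foldl_cons, ih]
    simp [List.map_map, Function.comp, pvVal]

-- ===== VERDICT (by name: the statement is the Claim_ definition above) =====
theorem merge_channel_cfgs_py_spec : Claim_equal_merge_channel_cfgs_py := by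
  intro cfgs _ hpre
  obtain ⟨hne, h1, h2, _⟩ := hpre
  obtain ⟨c0, rest, rfl⟩ := List.exists_cons_of_ne_nil hne
  have h1' : (c0.map Prod.fst).Nodup := by simpa using h1
  have h2' : ∀ p ∈ c0, (p.2.map Prod.fst).Nodup := by simpa using h2
  show merge_channel_cfgs_py (c0 :: rest) = merge_channel_cfgs_py_alt (c0 :: rest)
  rw [pv_A_nf c0 rest h1' h2']
  unfold merge_channel_cfgs_py_alt
  simp only [PySem.List.pyGetD_zero_cons, PySem.List.slice_from_one, List.tail_cons]
  rw [pv_B_fold rest (c0.map (fun p => (p.1, p.2.map (fun q => (q.1, [q.2])))))]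
  simp only [List.map_map]
  apply List.map_congr_left
  intro p hp
  have hget : (PySem.Dict.mk c0).get? p.1 = some p.2 :=
    PySem.Dict.get?_of_mem_items _ (by simpa [PySem.Dict.items] using hp) (by simpa using h1')
  simp only [List.map_map, Function.comp]
  congr 1
  apply List.map_congr_left
  intro q hq
  have hget2 : (PySem.Dict.mk p.2).get? q.1 = some q.2 :=
    PySem.Dict.get?_of_mem_items _ (by simpa [PySem.Dict.items] using hq) (by simpa using h2' p hp)
  simp [pvVal, hget, hget2]
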